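-- pv_equiv track=rewrite | github.com/thx1138234/project-jenni | ingestion/990/downloader.py | match_eins
-- ===== SOURCE A (Python) =====
-- def _norm_ein(ein: str) -> str:
--     """Normalise EIN to 9-digit string without hyphens."""
--     return ein.replace("-", "").strip().zfill(9)
--
-- def match_eins(rows: list[dict], target_eins: set[str]) -> list[dict]:
--     """
--     Filter index rows to those whose EIN is in target_eins.
--     Takes the most recent filing per EIN (by TAX_PERIOD, descending).
--     """
--     by_ein: dict[str, dict] = {}
--     for row in rows:
--         ein = _norm_ein(row["EIN"])
--         if ein not in target_eins:
--             continue
--         existing = by_ein.get(ein)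
--         if existing is None or row["TAX_PERIOD"] > existing["TAX_PERIOD"]:
--             by_ein[ein] = row
--     return list(by_ein.values())
-- ===== SOURCE B (Python) =====
-- def _norm_ein(ein: str) -> str:
--     """Normalise EIN to 9-digit string without hyphens."""
--     return ein.replace("-", "").strip().zfill(9)
--
--
-- def match_eins(rows: list[dict], target_eins: set[str]) -> list[dict]:
--     """Two staged passes, no dict: first collect the distinct matching EINs in
--     first-occurrence order, then for each EIN scan rows for its latest filing
--     (first maximal TAX_PERIOD wins, as in A)."""
--     order: list[str] = []
--     for row in rows:
--         ein = _norm_ein(row["EIN"])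
--         if ein in target_eins and ein not in order:
--             order.append(ein)
--     out = []
--     for ein in order:
--         group = [r for r in rows if _norm_ein(r["EIN"]) == ein]
--         best = group[0]
--         for r in group[1:]:
--             if r["TAX_PERIOD"] > best["TAX_PERIOD"]:
--                 best = r
--         out.append(best)
--     return out
-- ===== Notes on version B (the rewrite author's own statement) =====
-- stated objective: alternative
-- what changed: A keeps a running best-so-far row in an EIN-keyed dict in one pass; B uses no dict at all: it first lists the distinct matching EINs in first-occurrence order, then for each EIN re-scans the rows and folds the group to its latest filing.
import Mathlib
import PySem

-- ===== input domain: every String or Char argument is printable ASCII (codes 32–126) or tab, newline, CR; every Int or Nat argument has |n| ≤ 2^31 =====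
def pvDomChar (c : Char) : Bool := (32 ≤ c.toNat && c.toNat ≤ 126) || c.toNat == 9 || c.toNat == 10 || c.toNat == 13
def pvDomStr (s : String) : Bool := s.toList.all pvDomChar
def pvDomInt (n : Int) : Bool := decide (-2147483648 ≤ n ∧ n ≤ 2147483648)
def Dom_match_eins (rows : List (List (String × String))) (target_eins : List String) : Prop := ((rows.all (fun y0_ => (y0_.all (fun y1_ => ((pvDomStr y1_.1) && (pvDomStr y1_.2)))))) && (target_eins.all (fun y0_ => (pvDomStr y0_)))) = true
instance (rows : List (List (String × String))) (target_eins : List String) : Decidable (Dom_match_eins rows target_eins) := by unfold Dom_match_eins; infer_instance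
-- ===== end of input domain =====

-- B replaces A's single-pass dict of running best rows by two staged passes
-- with no dict: collect the distinct matching EINs in first-occurrence order,
-- then for each EIN re-scan the rows and fold its group to the latest filing.

-- shared helpers (both Pythons use _norm_ein and row["..."] lookups)
def pvNormEin (ein : String) : String :=
  PySem.Str.zfill (PySem.Str.strip (PySem.Str.replace ein "-" "")) 9

def pvEinOf (row : List (String × String)) : String :=
  pvNormEin ((PySem.Dict.mk row).getD "EIN" "")

def pvTaxOf (row : List (String × String)) : String :=
  (PySem.Dict.mk row).getD "TAX_PERIOD" ""

-- ===== PORT A =====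
def pvStepA (target_eins : List String)
    (byEin : PySem.Dict String (List (String × String))) (row : List (String × String)) :
    PySem.Dict String (List (String × String)) :=
  let ein := pvEinOf row
  if target_eins.contains ein then
    match byEin.get? ein with
    | none => byEin.insert ein row
    | some existing =>
        if pvTaxOf existing < pvTaxOf row then byEin.insert ein row else byEin
  else byEin

def match_eins (rows : List (List (String × String))) (target_eins : List String) :
    List (List (String × String)) :=
  (rows.foldl (pvStepA target_eins) PySem.Dict.empty).values

-- ===== PORT B =====
-- first pass: distinct matching EINs, first-occurrence order
def pvOrderStep (target_eins : List String) (acc : List String) (row : List (String × String)) :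
    List String :=
  let ein := pvEinOf row
  if target_eins.contains ein && !(acc.contains ein) then acc ++ [ein] else acc

-- best = group[0]; for r in group[1:]: if r.TAX_PERIOD > best.TAX_PERIOD: best = r
-- (group[0] is only evaluated on nonempty groups in B; headD is its total form)
def pvLatest (group : List (List (String × String))) : List (String × String) :=
  group.tail.foldl (fun best r => if pvTaxOf best < pvTaxOf r then r else best) (group.headD [])

def match_eins_alt (rows : List (List (String × String))) (target_eins : List String) :
    List (List (String × String)) :=
  (rows.foldl (pvOrderStep target_eins) []).map
    (fun ein => pvLatest (rows.filter (fun r => pvEinOf r == ein)))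

-- ===== PRECONDITION & SPEC =====
def pvHasKey (row : List (String × String)) (k : String) : Bool :=
  row.any (fun p => p.1 == k)

-- Pre_ excludes exactly the inputs where the Python raises KeyError: a row
-- without "EIN", or a matched EIN with ≥ 2 rows one of which lacks "TAX_PERIOD".
def Pre_match_eins (rows : List (List (String × String))) (target_eins : List String) : Prop :=
  (rows.all (fun r => pvHasKey r "EIN")) = true ∧
  ∀ r ∈ rows, pvEinOf r ∈ target_eins →
    2 ≤ rows.countP (fun r' => pvEinOf r' == pvEinOf r) →
    pvHasKey r "TAX_PERIOD" = true

instance (rows : List (List (String × String))) (target_eins : List String) :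
    Decidable (Pre_match_eins rows target_eins) := by unfold Pre_match_eins; infer_instance

def pvWitness_match_eins : (List (List (String × String))) × List String :=
  ([[("EIN", "12-3"), ("TAX_PERIOD", "201812")], [("EIN", "12-3"), ("TAX_PERIOD", "201912")]],
   ["000000123"])

def Spec_match_eins (rows : List (List (String × String))) (target_eins : List String)
    (out : List (List (String × String))) : Prop := out = match_eins_alt rows target_eins

instance (rows : List (List (String × String))) (target_eins : List String)
    (out : List (List (String × String))) : Decidable (Spec_match_eins rows target_eins out) := by
  unfold Spec_match_eins; infer_instance

-- ===== CLAIM (what is proved, stated in full; the proofs are below) =====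
def Claim_equal_match_eins : Prop := ∀ (rows : List (List (String × String))) (target_eins : List String), Dom_match_eins rows target_eins → Pre_match_eins rows target_eins → Spec_match_eins rows target_eins (match_eins rows target_eins)

-- ===== LEMMAS AND PROOFS =====

-- the EIN order after processing a prefix p
def pvOrder (target_eins : List String) (p : List (List (String × String))) : List String :=
  p.foldl (pvOrderStep target_eins) []

-- the best row among the rows of a prefix with a given EIN
def pvBestOf (p : List (List (String × String))) (ein : String) : List (String × String) :=
  pvLatest (p.filter (fun r => pvEinOf r == ein))

-- A's dict as a function of the processed prefix
def pvModel (target_eins : List String) (p : List (List (String × String))) :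
    PySem.Dict String (List (String × String)) :=
  PySem.Dict.mk ((pvOrder target_eins p).map (fun e => (e, pvBestOf p e)))

theorem order_mem (target_eins : List String) :
    ∀ (p : List (List (String × String))) (acc : List String) (s : String),
      s ∈ p.foldl (pvOrderStep target_eins) acc ↔
        s ∈ acc ∨ (target_eins.contains s = true ∧ ∃ r ∈ p, pvEinOf r = s) := by
  intro p
  induction p with
  | nil => intro acc s; simp
  | cons row rest ih =>
      intro acc s
      rw [List.foldl_cons, ih]
      unfold pvOrderStep
      dsimp only
      by_cases hc : (target_eins.contains (pvEinOf row) && !(acc.contains (pvEinOf row))) = true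
      · rw [if_pos hc]
        simp only [Bool.and_eq_true, Bool.not_eq_true'] at hc
        constructor
        · rintro (h | ⟨ht, r, hr, he⟩)
          · rcases List.mem_append.mp h with h | h
            · exact Or.inl h
            · have hs : s = pvEinOf row := by simpa using h
              exact Or.inr ⟨hs ▸ hc.1, row, List.mem_cons_self, hs.symm⟩
          · exact Or.inr ⟨ht, r, List.mem_cons_of_mem _ hr, he⟩
        · rintro (h | ⟨ht, r, hr, he⟩)
          · exact Or.inl (List.mem_append.mpr (Or.inl h))
          · rcases List.mem_cons.mp hr with rfl | hr
            · exact Or.inl (List.mem_append.mpr (Or.inr (by simp [he])))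
            · exact Or.inr ⟨ht, r, hr, he⟩
      · rw [if_neg hc]
        simp only [Bool.and_eq_true, Bool.not_eq_true'] at hc
        constructor
        · rintro (h | ⟨ht, r, hr, he⟩)
          · exact Or.inl h
          · exact Or.inr ⟨ht, r, List.mem_cons_of_mem _ hr, he⟩
        · rintro (h | ⟨ht, r, hr, he⟩)
          · exact Or.inl h
          · rcases List.mem_cons.mp hr with rfl | hr
            · left
              subst he
              rcases not_and_or.mp hc with h1 | h1
              · exact absurd ht h1
              · cases hb : acc.contains (pvEinOf r) with
                | false => exact absurd hb h1
                | true => simpa using hb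
            · exact Or.inr ⟨ht, r, hr, he⟩

theorem get?_mk_map (f : String → List (String × String)) :
    ∀ (l : List String) (k : String),
      (PySem.Dict.mk (l.map (fun e => (e, f e)))).get? k =
        if k ∈ l then some (f k) else none := by
  intro l
  induction l with
  | nil =>
      intro k
      simp only [List.map_nil]
      rw [show (PySem.Dict.mk ([] : List (String × List (String × String))))
          = PySem.Dict.empty from rfl, PySem.Dict.get?_empty]
      simp
  | cons a t ih =>
      intro k
      rw [List.map_cons, PySem.Dict.get?_mk_cons, ih]
      by_cases h : a = k
      · subst h
        simp
      · have hiff : (k ∈ a :: t) ↔ k ∈ t := by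
          simp only [List.mem_cons]
          exact or_iff_right (fun he => h he.symm)
        rw [if_neg (by simp [h])]
        simp only [hiff]

theorem values_mk_map (f : String → List (String × String)) (l : List String) :
    (PySem.Dict.mk (l.map (fun e => (e, f e)))).values = l.map f := by
  simp [PySem.Dict.values, List.map_map, Function.comp]

theorem pvLatest_append (g : List (List (String × String))) (r : List (String × String)) :
    pvLatest (g ++ [r]) =
      if g = [] then r
      else if pvTaxOf (pvLatest g) < pvTaxOf r then r else pvLatest g := by
  cases g with
  | nil => simp [pvLatest]
  | cons x t => simp [pvLatest, List.foldl_append]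

theorem filter_ne_nil_of_mem_order (target_eins : List String)
    (p : List (List (String × String))) (e : String)
    (h : e ∈ pvOrder target_eins p) :
    p.filter (fun r => pvEinOf r == e) ≠ [] := by
  rcases (order_mem target_eins p [] e).mp h with h | ⟨_, r, hr, he⟩
  · cases h
  · intro hf
    have := List.filter_eq_nil_iff.mp hf r hr
    simp [he] at this

theorem filter_eq_nil_of_not_mem_order (target_eins : List String)
    (p : List (List (String × String))) (e : String)
    (ht : target_eins.contains e = true) (h : e ∉ pvOrder target_eins p) :
    p.filter (fun r => pvEinOf r == e) = [] := by
  apply List.filter_eq_nil_iff.mpr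
  intro r hr
  simp only [beq_iff_eq]
  intro he
  exact h ((order_mem target_eins p [] e).mpr (Or.inr ⟨ht, r, hr, he⟩))

-- filter over the prefix extended by one row
theorem filter_snoc (p : List (List (String × String))) (row : List (String × String))
    (e : String) :
    (p ++ [row]).filter (fun r => pvEinOf r == e) =
      p.filter (fun r => pvEinOf r == e) ++ (if pvEinOf row == e then [row] else []) := by
  cases h : (pvEinOf row == e) <;>
    simp [List.filter_append, h]

set_option maxHeartbeats 1000000 in
theorem step_model (target_eins : List String) (p : List (List (String × String)))
    (row : List (String × String)) :
    pvStepA target_eins (pvModel target_eins p) row = pvModel target_eins (p ++ [row]) := by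
  have horder : pvOrder target_eins (p ++ [row])
      = pvOrderStep target_eins (pvOrder target_eins p) row := by
    simp [pvOrder, List.foldl_append]
  unfold pvStepA
  dsimp only
  by_cases ht : target_eins.contains (pvEinOf row) = true
  · rw [if_pos ht]
    by_cases hm : pvEinOf row ∈ pvOrder target_eins p
    · -- EIN already seen: order unchanged, group extended
      have hcontains : (pvOrder target_eins p).contains (pvEinOf row) = true := by
        simpa using hm
      have horder2 : pvOrder target_eins (p ++ [row]) = pvOrder target_eins p := by
        rw [horder]
        unfold pvOrderStep
        dsimp only
        rw [if_neg]
        rw [Bool.and_eq_true]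
        rintro ⟨-, h2⟩
        simp at h2
        exact h2 hm
      have hget : (pvModel target_eins p).get? (pvEinOf row)
          = some (pvBestOf p (pvEinOf row)) := by
        rw [pvModel, get?_mk_map, if_pos hm]
      rw [hget]
      show (if pvTaxOf (pvBestOf p (pvEinOf row)) < pvTaxOf row then
          (pvModel target_eins p).insert (pvEinOf row) row else pvModel target_eins p)
        = pvModel target_eins (p ++ [row])
      have hbest : pvBestOf (p ++ [row]) (pvEinOf row) =
          if pvTaxOf (pvBestOf p (pvEinOf row)) < pvTaxOf row then row
          else pvBestOf p (pvEinOf row) := by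
        unfold pvBestOf
        rw [filter_snoc, if_pos (by simp), pvLatest_append,
          if_neg (filter_ne_nil_of_mem_order target_eins p _ hm)]
      have hbest_other : ∀ e ∈ pvOrder target_eins p, e ≠ pvEinOf row →
          pvBestOf (p ++ [row]) e = pvBestOf p e := by
        intro e _ hne
        have hne2 : ¬ (pvEinOf row == e) = true := by
          simp only [beq_iff_eq]
          exact fun h => hne h.symm
        unfold pvBestOf
        rw [filter_snoc, if_neg hne2, List.append_nil]
      have hitems : ∀ v, (pvModel target_eins p).insert (pvEinOf row) v
          = PySem.Dict.mk ((pvOrder target_eins p).map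
              (fun e => (e, if e = pvEinOf row then v else pvBestOf p e))) := by
        intro v
        apply PySem.Dict.ext
        rw [PySem.Dict.items_insert_of_contains _ v
          (by rw [PySem.Dict.contains_eq_isSome_get?, hget]; rfl)]
        rw [show (pvModel target_eins p).items
            = (pvOrder target_eins p).map (fun e => (e, pvBestOf p e)) from rfl,
          List.map_map]
        show _ = List.map (fun e => (e, if e = pvEinOf row then v else pvBestOf p e))
          (pvOrder target_eins p)
        apply List.map_congr_left
        intro e _
        by_cases h : e = pvEinOf row <;> simp [Function.comp, h]
      by_cases hcmp : pvTaxOf (pvBestOf p (pvEinOf row)) < pvTaxOf row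
      · rw [if_pos hcmp, hitems row, pvModel, horder2]
        refine congrArg PySem.Dict.mk ?_
        apply List.map_congr_left
        intro e he
        by_cases h : e = pvEinOf row
        · subst h; rw [if_pos rfl, hbest, if_pos hcmp]
        · rw [if_neg h, hbest_other e he h]
      · rw [if_neg hcmp, pvModel, pvModel, horder2]
        refine congrArg PySem.Dict.mk ?_
        apply List.map_congr_left
        intro e he
        by_cases h : e = pvEinOf row
        · subst h; rw [hbest, if_neg hcmp]
        · rw [hbest_other e he h]
    · -- new EIN: appended to the order, group is just [row]
      have hget : (pvModel target_eins p).get? (pvEinOf row) = none := by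
        rw [pvModel, get?_mk_map, if_neg hm]
      rw [hget]
      show (pvModel target_eins p).insert (pvEinOf row) row = pvModel target_eins (p ++ [row])
      have horder2 : pvOrder target_eins (p ++ [row])
          = pvOrder target_eins p ++ [pvEinOf row] := by
        rw [horder]; unfold pvOrderStep; dsimp only
        rw [if_pos (by rw [Bool.and_eq_true]; exact ⟨ht, by simpa using hm⟩)]
      apply PySem.Dict.ext
      rw [PySem.Dict.items_insert_of_not_contains _ row
        (by rw [PySem.Dict.contains_eq_isSome_get?, hget]; rfl)]
      show ((pvOrder target_eins p).map _) ++ _ = _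
      rw [pvModel, horder2]
      show _ = ((pvOrder target_eins p ++ [pvEinOf row]).map _)
      rw [List.map_append]
      congr 1
      · apply List.map_congr_left
        intro e he
        have hne : e ≠ pvEinOf row := fun h => hm (h ▸ he)
        have hne2 : ¬ (pvEinOf row == e) = true := by
          simp only [beq_iff_eq]
          exact fun h => hne h.symm
        unfold pvBestOf
        rw [filter_snoc, if_neg hne2, List.append_nil]
      · show [(pvEinOf row, row)] = [(pvEinOf row, pvBestOf (p ++ [row]) (pvEinOf row))]
        have hb : pvBestOf (p ++ [row]) (pvEinOf row) = row := by
          unfold pvBestOf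
          rw [filter_snoc, if_pos (by simp),
            filter_eq_nil_of_not_mem_order target_eins p _ ht hm]
          rfl
        rw [hb]
  · -- non-target row: nothing changes
    rw [if_neg ht]
    have hcf : target_eins.contains (pvEinOf row) = false := by
      cases h : target_eins.contains (pvEinOf row)
      · rfl
      · exact absurd h ht
    have horder2 : pvOrder target_eins (p ++ [row]) = pvOrder target_eins p := by
      rw [horder]; unfold pvOrderStep; dsimp only
      rw [if_neg]
      rw [Bool.and_eq_true]
      rintro ⟨h1, -⟩
      exact ht h1
    rw [pvModel, pvModel, horder2]
    refine congrArg PySem.Dict.mk ?_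
    apply List.map_congr_left
    intro e he
    have hne : pvEinOf row ≠ e := by
      intro h
      rcases (order_mem target_eins p [] e).mp he with h1 | ⟨ht2, _⟩
      · cases h1
      · rw [h, ht2] at hcf; cases hcf
    unfold pvBestOf
    rw [filter_snoc, if_neg (by simp [hne]), List.append_nil]

theorem loop_model (target_eins : List String) :
    ∀ (rest p : List (List (String × String))),
      rest.foldl (pvStepA target_eins) (pvModel target_eins p)
        = pvModel target_eins (p ++ rest) := by
  intro rest
  induction rest with
  | nil => intro p; simp
  | cons row rest ih =>
      intro p
      rw [List.foldl_cons, step_model, ih]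
      congr 1
      simp

-- ===== VERDICT (by name: the statement is the Claim_ definition above) =====
theorem match_eins_spec : Claim_equal_match_eins := by
  intro rows target_eins _ _
  unfold Spec_match_eins match_eins match_eins_alt
  rw [show (PySem.Dict.empty : PySem.Dict String (List (String × String)))
      = pvModel target_eins [] from rfl,
    loop_model target_eins rows [], List.nil_append, pvModel, values_mk_map]
  rfl
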